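-- pv_equiv track=rewrite | github.com/LilianaKor/pythonProject2 | ninjas25/hw9_js.py | longest_unique_subarray
-- ===== SOURCE A (Python) =====
-- def longest_unique_subarray(arr):
--     last_index = {}  # значение -> последний индекс
--     start = 0  # начало текущего окна
--     best_start, best_len = 0, 0
--
--     for i, v in enumerate(arr):
--         # если значение уже встречалось в текущем окне → двигаем start
--         if v in last_index and last_index[v] >= start:
--             start = last_index[v] + 1
--
--         last_index[v] = i
--
--         # проверяем длину текущего окна
--         length = i - start + 1
--         if length > best_len:
--             best_len = length
--             best_start = start
--
--     return arr[best_start:best_start + best_len]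
-- ===== SOURCE B (Python) =====
-- def longest_unique_subarray(arr):
--     window = set()
--     start = 0
--     best_start, best_len = 0, 0
--
--     for i, v in enumerate(arr):
--         # shrink the window from the left until v is no longer inside it
--         while v in window:
--             window.discard(arr[start])
--             start += 1
--         window.add(v)
--
--         length = i - start + 1
--         if length > best_len:
--             best_len = length
--             best_start = start
--
--     return arr[best_start:best_start + best_len]
-- ===== Notes on version B (the rewrite author's own statement) =====
-- stated objective: idiomatic
-- what changed: Replaces the value-to-last-index dict and its index-arithmetic jump of start with a plain sliding-window set and an inner while loop that discards arr[start] and advances start until the new value leaves the window.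
import Mathlib
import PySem

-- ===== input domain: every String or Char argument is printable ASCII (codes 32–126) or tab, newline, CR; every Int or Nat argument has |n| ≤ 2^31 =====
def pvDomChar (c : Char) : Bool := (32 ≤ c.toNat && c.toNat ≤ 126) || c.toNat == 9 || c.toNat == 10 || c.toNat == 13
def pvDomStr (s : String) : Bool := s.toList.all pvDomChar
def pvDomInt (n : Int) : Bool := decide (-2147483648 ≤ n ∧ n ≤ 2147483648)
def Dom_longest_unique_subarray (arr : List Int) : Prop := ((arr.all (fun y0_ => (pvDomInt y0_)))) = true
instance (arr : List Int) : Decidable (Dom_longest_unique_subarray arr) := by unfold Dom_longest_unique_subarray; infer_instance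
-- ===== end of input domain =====

-- B keeps the two-pointer window as a set shrunk by an inner while loop instead of A's value→last-index dict; return value only, no mutation.

-- ===== PORT A =====
-- loop body of A: dict last_index, start, best_start, best_len
def lusStepA (st : PySem.Dict Int Int × Int × Int × Int) (iv : Int × Int) :
    PySem.Dict Int Int × Int × Int × Int :=
  let (d, start, best_start, best_len) := st
  let (i, v) := iv
  let start :=
    match d.get? v with              -- 'v in last_index and last_index[v] >= start'
    | some j => if start ≤ j then j + 1 else start
    | none => start
  let d := d.insert v i
  let length := i - start + 1
  if best_len < length then (d, start, start, length)
  else (d, start, best_start, best_len)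

def longest_unique_subarray (arr : List Int) : List Int :=
  let st := (PySem.List.enumerate arr).foldl lusStepA (PySem.Dict.empty, 0, 0, 0)
  PySem.List.slice arr (some st.2.2.1) (some (st.2.2.1 + st.2.2.2))

-- ===== PORT B =====
-- the inner 'while v in window: window.discard(arr[start]); start += 1' loop;
-- fuel only makes it total (never exhausted when fuel > number of iterations);
-- the 'none' arm is where Python's arr[start] would raise IndexError (unreachable).
def lusShrink (arr : List Int) (v : Int) : Nat → PySem.Set Int → Int → PySem.Set Int × Int
  | 0, w, start => (w, start)
  | fuel + 1, w, start =>
    if PySem.Set.contains w v then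
      match PySem.List.pyGet? arr start with
      | some x => lusShrink arr v fuel (PySem.Set.discard w x) (start + 1)
      | none => (w, start)
    else (w, start)

-- loop body of B: set window, start, best_start, best_len
def lusStepB (arr : List Int) (st : PySem.Set Int × Int × Int × Int) (iv : Int × Int) :
    PySem.Set Int × Int × Int × Int :=
  let (w, start, best_start, best_len) := st
  let (i, v) := iv
  let ws := lusShrink arr v (arr.length + 1) w start
  let w := PySem.Set.add ws.1 v
  let start := ws.2
  let length := i - start + 1
  if best_len < length then (w, start, start, length)
  else (w, start, best_start, best_len)

def longest_unique_subarray_alt (arr : List Int) : List Int :=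
  let st := (PySem.List.enumerate arr).foldl (lusStepB arr) (PySem.Set.empty, 0, 0, 0)
  PySem.List.slice arr (some st.2.2.1) (some (st.2.2.1 + st.2.2.2))

-- ===== PRECONDITION & SPEC =====
def Spec_longest_unique_subarray (arr : List Int) (out : List Int) : Prop := out = longest_unique_subarray_alt arr
instance (arr : List Int) (out : List Int) : Decidable (Spec_longest_unique_subarray arr out) := by unfold Spec_longest_unique_subarray; infer_instance

-- ===== CLAIM (what is proved, stated in full; the proofs are below) =====
def Claim_equal_longest_unique_subarray : Prop := ∀ (arr : List Int), Dom_longest_unique_subarray arr → Spec_longest_unique_subarray arr (longest_unique_subarray arr)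

-- ===== LEMMAS AND PROOFS =====

-- 'o is the index of the LAST occurrence of v in p (none if absent)' — what A's dict stores
def IsLastIdx (p : List Int) (v : Int) (o : Option Int) : Prop :=
  match o with
  | none => v ∉ p
  | some j => ∃ k : Nat, j = (k : Int) ∧ ∃ h : k < p.length, p[k] = v ∧
      ∀ m, k < m → ∀ hm : m < p.length, p[m] ≠ v

lemma isLastIdx_insert (p : List Int) (v : Int) (d : PySem.Dict Int Int)
    (h : ∀ u, IsLastIdx p u (d.get? u)) :
    ∀ u, IsLastIdx (p ++ [v]) u ((d.insert v (p.length : Int)).get? u) := by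
  intro u
  by_cases hu : u = v
  · subst hu
    rw [PySem.Dict.get?_insert_self]
    exact ⟨p.length, rfl, by simp, List.getElem_concat_length rfl _,
      fun m hm hml => by simp at hml; omega⟩
  · rw [PySem.Dict.get?_insert_of_ne d (p.length : Int) hu]
    have hold := h u
    cases hq : d.get? u with
    | none =>
      rw [hq] at hold
      simp only [IsLastIdx] at hold ⊢
      intro hmem
      rcases List.mem_append.mp hmem with h1 | h1
      · exact hold h1
      · exact hu (List.mem_singleton.mp h1)
    | some j =>
      rw [hq] at hold
      obtain ⟨k, hjk, hk, hpk, hlast⟩ := hold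
      refine ⟨k, hjk, by simp; omega, ?_, ?_⟩
      · rw [List.getElem_append_left hk]; exact hpk
      · intro m hm hml
        rcases Nat.lt_or_ge m p.length with hlt | hge
        · rw [List.getElem_append_left hlt]; exact hlast m hm hlt
        · have hmeq : m = p.length := by simp at hml; omega
          subst hmeq
          rw [List.getElem_concat_length rfl _]
          exact Ne.symm hu

lemma lusShrink_nomem (arr : List Int) (v : Int) (fuel : Nat) (w : PySem.Set Int)
    (start : Int) (hv : v ∉ w) :
    lusShrink arr v (fuel + 1) w start = (w, start) := by
  have hc : PySem.Set.contains w v = false := by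
    rw [← Bool.not_eq_true, PySem.Set.contains_iff]; exact hv
  simp only [lusShrink]
  rw [hc]
  simp

lemma lusShrink_spec (p rest : List Int) (v : Int) (k : Nat) (hk : k < p.length)
    (hpk : p[k] = v) (hlast : ∀ m, k < m → ∀ hm : m < p.length, p[m] ≠ v) :
    ∀ (fuel s : Nat) (w : PySem.Set Int), s ≤ k + 1 → k + 2 - s ≤ fuel →
    (∀ x, x ∈ w ↔ x ∈ p.drop s) → (p.drop s).Nodup →
    ∃ w', lusShrink (p ++ rest) v fuel w (s : Int) = (w', (k : Int) + 1) ∧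
      (∀ x, x ∈ w' ↔ x ∈ p.drop (k + 1)) := by
  intro fuel
  induction fuel with
  | zero => intro s w hs hf _ _; omega
  | succ fuel ih =>
    intro s w hs hf hw hnd
    by_cases hsk : s ≤ k
    · -- v is still in the window: one more iteration
      have hsl : s < p.length := by omega
      have hvw : v ∈ w := by
        rw [hw]
        rw [List.mem_iff_getElem]
        refine ⟨k - s, by simp; omega, ?_⟩
        rw [List.getElem_drop]
        have : s + (k - s) = k := by omega
        simp_rw [this]; exact hpk
      have hc : PySem.Set.contains w v = true := (PySem.Set.contains_iff w v).mpr hvw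
      have hget : PySem.List.pyGet? (p ++ rest) (s : Int) = some p[s] := by
        rw [PySem.List.pyGet?_natCast]
        rw [List.getElem?_append_left hsl, List.getElem?_eq_getElem hsl]
      have hdropcons : p.drop s = p[s] :: p.drop (s + 1) := List.drop_eq_getElem_cons hsl
      have hnd' : (p.drop (s + 1)).Nodup := by
        rw [hdropcons] at hnd; exact hnd.of_cons
      have hhead : p[s] ∉ p.drop (s + 1) := by
        rw [hdropcons] at hnd; exact (List.nodup_cons.mp hnd).1
      have hw' : ∀ x, x ∈ PySem.Set.discard w p[s] ↔ x ∈ p.drop (s + 1) := by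
        intro x
        rw [PySem.Set.mem_discard, hw, hdropcons]
        constructor
        · rintro ⟨hx, hne⟩
          rcases List.mem_cons.mp hx with h1 | h1
          · exact absurd h1 hne
          · exact h1
        · intro hx
          exact ⟨List.mem_cons_of_mem _ hx, fun he => hhead (he ▸ hx)⟩
      have hcast : (s : Int) + 1 = ((s + 1 : Nat) : Int) := by push_cast; ring
      obtain ⟨w', hrec, hmem⟩ := ih (s + 1) (PySem.Set.discard w p[s]) (by omega) (by omega) hw' hnd'
      refine ⟨w', ?_, hmem⟩
      simp only [lusShrink, hc, hget, if_true]
      rw [hcast]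
      exact hrec
    · -- s = k + 1: the loop condition is already false
      have hseq : s = k + 1 := by omega
      subst hseq
      have hvnot : v ∉ w := by
        rw [hw]
        intro hv
        rw [List.mem_iff_getElem] at hv
        obtain ⟨i, hi, hpi⟩ := hv
        rw [List.getElem_drop] at hpi
        exact hlast (k + 1 + i) (by omega) (by simp at hi; omega) hpi
      refine ⟨w, ?_, hw⟩
      have hcast : ((k + 1 : Nat) : Int) = (k : Int) + 1 := by push_cast; ring
      rw [← hcast]
      exact lusShrink_nomem (p ++ rest) v fuel w _ hvnot

lemma lus_main (arr : List Int) : ∀ (rest p : List Int), arr = p ++ rest →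
    ∀ (d : PySem.Dict Int Int) (w : PySem.Set Int) (s : Nat) (bs bl : Int),
    (∀ u, IsLastIdx p u (d.get? u)) →
    s ≤ p.length →
    (∀ x, x ∈ w ↔ x ∈ p.drop s) →
    (p.drop s).Nodup →
    ((PySem.List.enumerate rest (p.length : Int)).foldl lusStepA (d, (s : Int), bs, bl)).2
      = ((PySem.List.enumerate rest (p.length : Int)).foldl (lusStepB arr) (w, (s : Int), bs, bl)).2 := by
  intro rest
  induction rest with
  | nil => intro p _ d w s bs bl _ _ _ _; rfl
  | cons v rest ih =>
    intro p harr d w s bs bl hd hs hw hnd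
    -- the new start index ns, and the shrunk window w₁
    obtain ⟨ns, w₁, hshrink, hAstart, hwin, hvnot, hns_le, hns_ge⟩ :
        ∃ (ns : Nat) (w₁ : PySem.Set Int),
          lusShrink arr v (arr.length + 1) w (s : Int) = (w₁, (ns : Int)) ∧
          (match d.get? v with
            | some j => if (s : Int) ≤ j then j + 1 else (s : Int)
            | none => (s : Int)) = (ns : Int) ∧
          (∀ x, x ∈ w₁ ↔ x ∈ p.drop ns) ∧ v ∉ p.drop ns ∧ ns ≤ p.length ∧ s ≤ ns := by
      have hdv := hd v
      cases hq : d.get? v with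
      | none =>
        rw [hq] at hdv
        have hvnw : v ∉ w := by
          rw [hw]; intro hv; exact hdv (List.mem_of_mem_drop hv)
        refine ⟨s, w, ?_, rfl, hw, ?_, hs, le_refl s⟩
        · exact lusShrink_nomem arr v arr.length w (s : Int) hvnw
        · intro hv; exact hdv (List.mem_of_mem_drop hv)
      | some j =>
        rw [hq] at hdv
        obtain ⟨k, hjk, hkl, hpk, hlast⟩ := hdv
        subst hjk
        by_cases hsk : (s : Int) ≤ (k : Int)
        · have hsk' : s ≤ k := by exact_mod_cast hsk
          obtain ⟨w', hrec, hmem⟩ := lusShrink_spec p (v :: rest) v k hkl hpk hlast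
            (arr.length + 1) s w (by omega) (by simp [harr]; omega) hw hnd
          rw [← harr] at hrec
          refine ⟨k + 1, w', ?_, ?_, hmem, ?_, by omega, by omega⟩
          · have hc1 : ((k + 1 : Nat) : Int) = (k : Int) + 1 := by push_cast; ring
            rw [hc1, hrec]
          · show (if (s : Int) ≤ (k : Int) then (k : Int) + 1 else (s : Int)) = ((k + 1 : Nat) : Int)
            rw [if_pos hsk]; push_cast; ring
          · intro hv
            rw [List.mem_iff_getElem] at hv
            obtain ⟨i, hi, hpi⟩ := hv
            rw [List.getElem_drop] at hpi
            exact hlast (k + 1 + i) (by omega) (by simp at hi; omega) hpi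
        · have hks : k < s := by omega
          have hvnw : v ∉ p.drop s := by
            intro hv
            rw [List.mem_iff_getElem] at hv
            obtain ⟨i, hi, hpi⟩ := hv
            rw [List.getElem_drop] at hpi
            have his : s + i < p.length := by simp at hi; omega
            have := hlast (s + i) (by omega) his
            exact this hpi
          refine ⟨s, w, ?_, ?_, hw, hvnw, hs, le_refl s⟩
          · exact lusShrink_nomem arr v arr.length w (s : Int) (fun hv => hvnw ((hw v).mp hv))
          · show (if (s : Int) ≤ (k : Int) then (k : Int) + 1 else (s : Int)) = (s : Int)
            rw [if_neg hsk]
    -- take the step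
    rw [PySem.List.enumerate_cons]
    simp only [List.foldl_cons, lusStepA, lusStepB, hshrink, hAstart]
    -- the new prefix
    have hdrop : (p ++ [v]).drop ns = p.drop ns ++ [v] := List.drop_append_of_le_length hns_le
    have hd' := isLastIdx_insert p v d hd
    have hw' : ∀ x, x ∈ PySem.Set.add w₁ v ↔ x ∈ (p ++ [v]).drop ns := by
      intro x
      rw [PySem.Set.mem_add, hwin, hdrop]
      simp
    have hnd0 : (p.drop ns).Nodup := by
      have hsub : p.drop ns = (p.drop s).drop (ns - s) := by
        rw [List.drop_drop]
        congr 1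
        omega
      rw [hsub]
      exact hnd.sublist (List.drop_sublist _ _)
    have hnd' : ((p ++ [v]).drop ns).Nodup := by
      rw [hdrop]
      rw [List.nodup_append]
      refine ⟨hnd0, List.nodup_singleton v, ?_⟩
      intro a ha b hb
      rw [List.mem_singleton] at hb
      subst hb
      exact fun he => hvnot (he ▸ ha)
    have hcast : (p.length : Int) + 1 = (((p ++ [v]).length : Nat) : Int) := by
      simp
    split_ifs with hcond
    · rw [hcast]
      exact ih (p ++ [v]) (by rw [harr]; simp) (d.insert v (p.length : Int))
        (PySem.Set.add w₁ v) ns ((ns : Int)) ((p.length : Int) - (ns : Int) + 1)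
        hd' (by simp; omega) hw' hnd'
    · rw [hcast]
      exact ih (p ++ [v]) (by rw [harr]; simp) (d.insert v (p.length : Int))
        (PySem.Set.add w₁ v) ns bs bl hd' (by simp; omega) hw' hnd'

-- ===== VERDICT (by name: the statement is the Claim_ definition above) =====
theorem longest_unique_subarray_spec : Claim_equal_longest_unique_subarray := by
  intro arr _
  unfold Spec_longest_unique_subarray
  have h := lus_main arr arr [] rfl PySem.Dict.empty PySem.Set.empty 0 0 0
    (by intro u; simp [IsLastIdx, PySem.Dict.get?, PySem.Dict.empty])
    (by simp) (by simp [PySem.Set.empty]) (by simp)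
  simp only [List.length_nil, Nat.cast_zero] at h
  rcases hA : (PySem.List.enumerate arr 0).foldl lusStepA (PySem.Dict.empty, 0, 0, 0) with ⟨d, stA⟩
  rcases hB : (PySem.List.enumerate arr 0).foldl (lusStepB arr) (PySem.Set.empty, 0, 0, 0) with ⟨w, stB⟩
  have hst : stA = stB := by rw [hA, hB] at h; exact h
  simp only [longest_unique_subarray, longest_unique_subarray_alt]
  rw [hA, hB, hst]
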